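-- pv_equiv track=rewrite | github.com/shaneb74/cca_senior_navigator_v3 | products/cost_planner_v2/expert_review.py | _get_dynamic_coverage_label
-- ===== SOURCE A (Python) =====
-- def _get_dynamic_coverage_label(selected_assets, asset_categories):
--     """
--     Generate dynamic coverage label based on selected resources.
--
--     Examples:
--     - No assets: "Coverage from Income"
--     - Liquid only: "Coverage from Income and Liquid Assets"
--     - Retirement only: "Coverage from Income and Retirement Accounts"
--     - Both: "Coverage from Income, Liquid Assets, and Retirement Accounts"
--     """
--     # Asset name to friendly label mapping
--     friendly_names = {
--         "liquid_assets": "Liquid Assets",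
--         "retirement_accounts": "Retirement Accounts",
--         "life_insurance": "Life Insurance",
--         "annuities": "Annuities",
--         "home_equity": "Home Equity",
--         "other_real_estate": "Real Estate"
--     }
--
--     # Get selected asset names
--     selected_names = [
--         friendly_names.get(name, name.replace("_", " ").title())
--         for name, selected in selected_assets.items()
--         if selected and name in asset_categories
--     ]
--
--     # Build label
--     if not selected_names:
--         return "Coverage from Income"
--     elif len(selected_names) == 1:
--         return f"Coverage from Income and {selected_names[0]}"
--     else:
--         # Join with commas and "and" before last item
--         all_but_last = ", ".join(selected_names[:-1])
--         return f"Coverage from Income, {all_but_last}, and {selected_names[-1]}"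
-- ===== SOURCE B (Python) =====
-- def _get_dynamic_coverage_label(selected_assets, asset_categories):
--     # Single streaming pass: no intermediate list of selected names is built.
--     # The loop carries (head, last, count): the phrase so far (comma-chained),
--     # the most recent selected name held back, and how many were selected.
--     friendly_names = {
--         "liquid_assets": "Liquid Assets",
--         "retirement_accounts": "Retirement Accounts",
--         "life_insurance": "Life Insurance",
--         "annuities": "Annuities",
--         "home_equity": "Home Equity",
--         "other_real_estate": "Real Estate"
--     }
--     head = "Coverage from Income"
--     last = None
--     count = 0
--     for name, selected in selected_assets.items():
--         if not selected or name not in asset_categories: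
--             continue
--         if last is not None:
--             head = head + ", " + last
--         last = friendly_names.get(name, name.replace("_", " ").title())
--         count += 1
--     if last is None:
--         return head
--     if count == 1:
--         return head + " and " + last
--     return head + ", and " + last
-- ===== Notes on version B (the rewrite author's own statement) =====
-- stated objective: alternative
-- what changed: B replaces A's build-the-list-then-branch-on-its-length formatting with a single streaming pass: one loop over the items carries (phrase-so-far, held-back last name, count) and joins commas incrementally, so no intermediate selected-names list and no length-indexed slicing/joining are performed.
import Mathlib
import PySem

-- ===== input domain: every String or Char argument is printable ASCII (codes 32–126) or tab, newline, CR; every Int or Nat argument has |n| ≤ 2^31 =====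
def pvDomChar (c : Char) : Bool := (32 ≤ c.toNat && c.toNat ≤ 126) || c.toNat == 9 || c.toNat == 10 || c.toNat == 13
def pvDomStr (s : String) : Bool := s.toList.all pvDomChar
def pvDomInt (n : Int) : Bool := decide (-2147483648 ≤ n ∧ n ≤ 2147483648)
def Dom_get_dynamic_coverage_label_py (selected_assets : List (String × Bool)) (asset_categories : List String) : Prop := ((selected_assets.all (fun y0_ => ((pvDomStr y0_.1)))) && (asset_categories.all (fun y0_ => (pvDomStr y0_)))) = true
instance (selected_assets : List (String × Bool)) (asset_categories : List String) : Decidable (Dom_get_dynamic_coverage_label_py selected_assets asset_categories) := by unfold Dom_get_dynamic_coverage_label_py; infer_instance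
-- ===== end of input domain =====

-- B replaces A's build-the-names-list-then-branch-on-length formatting by one
-- streaming pass carrying (phrase-so-far, held-back last name, count); no
-- intermediate list, slice or join (objective: alternative decomposition).

-- ===== PORT A =====
-- Shared helpers: the friendly_names dict, str.title() and the friendly-name
-- lookup appear verbatim in BOTH Pythons, so both ports share them.

-- hand port of str.title(): exact on ASCII, where the cased characters are
-- exactly the letters; an alpha char is uppercased after a non-cased char,
-- lowercased after a cased one.
def pvTitleChars : List Char → Bool → List Char
  | [], _ => []
  | c :: rest, prevCased =>
    (if PySem.Chars.isalpha c then
      (if prevCased then PySem.Chars.lowerChar c else PySem.Chars.upperChar c)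
     else c) :: pvTitleChars rest (PySem.Chars.isalpha c)

def pvTitle (s : String) : String := String.ofList (pvTitleChars s.toList false)

def pvFriendlyNames : PySem.Dict String String :=
  PySem.Dict.ofList
    [("liquid_assets", "Liquid Assets"),
     ("retirement_accounts", "Retirement Accounts"),
     ("life_insurance", "Life Insurance"),
     ("annuities", "Annuities"),
     ("home_equity", "Home Equity"),
     ("other_real_estate", "Real Estate")]

-- friendly_names.get(name, name.replace("_", " ").title())  (same expression in both Pythons)
def pvFriendly (name : String) : String :=
  (PySem.Dict.get? pvFriendlyNames name).getD (pvTitle (PySem.Str.replace name "_" " "))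

-- A's selected_names comprehension
def pvSelectedNames (selected_assets : List (String × Bool)) (asset_categories : List String) : List String :=
  (selected_assets.filter (fun p => p.2 && asset_categories.contains p.1)).map (fun p => pvFriendly p.1)

def get_dynamic_coverage_label_py (selected_assets : List (String × Bool)) (asset_categories : List String) : String :=
  let selected_names := pvSelectedNames selected_assets asset_categories
  if selected_names.isEmpty then
    "Coverage from Income"
  else if selected_names.length == 1 then
    "Coverage from Income and " ++ ((PySem.List.pyGet? selected_names 0).getD "")
  else
    -- pyGet? defaults are unreachable: this branch has length ≥ 2
    let all_but_last := PySem.Str.join ", " (PySem.List.slice selected_names none (some (-1)))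
    "Coverage from Income, " ++ all_but_last ++ ", and " ++ ((PySem.List.pyGet? selected_names (-1)).getD "")

-- ===== PORT B =====
-- B's single streaming loop: state = (head, last, count)
def pvLoopB (asset_categories : List String) :
    List (String × Bool) → String × Option String × Int → String × Option String × Int
  | [], st => st
  | (name, selected) :: rest, (head, last, count) =>
    if !(selected && asset_categories.contains name) then
      pvLoopB asset_categories rest (head, last, count)
    else
      let head' := match last with | none => head | some x => head ++ ", " ++ x
      pvLoopB asset_categories rest (head', some (pvFriendly name), count + 1)

def get_dynamic_coverage_label_py_alt (selected_assets : List (String × Bool)) (asset_categories : List String) : String :=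
  match pvLoopB asset_categories selected_assets ("Coverage from Income", none, 0) with
  | (head, none, _) => head
  | (head, some last, count) =>
    if count == 1 then head ++ " and " ++ last
    else head ++ ", and " ++ last

-- ===== PRECONDITION & SPEC =====
def Spec_get_dynamic_coverage_label_py (selected_assets : List (String × Bool)) (asset_categories : List String) (out : String) : Prop := out = get_dynamic_coverage_label_py_alt selected_assets asset_categories
instance (selected_assets : List (String × Bool)) (asset_categories : List String) (out : String) : Decidable (Spec_get_dynamic_coverage_label_py selected_assets asset_categories out) := by unfold Spec_get_dynamic_coverage_label_py; infer_instance

-- ===== CLAIM (what is proved, stated in full; the proofs are below) =====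
def Claim_equal_get_dynamic_coverage_label_py : Prop := ∀ (selected_assets : List (String × Bool)) (asset_categories : List String), Dom_get_dynamic_coverage_label_py selected_assets asset_categories → Spec_get_dynamic_coverage_label_py selected_assets asset_categories (get_dynamic_coverage_label_py selected_assets asset_categories)

-- ===== LEMMAS AND PROOFS =====

-- B's loop seen on the list of selected names only
def pvChain : List String → String × Option String × Int → String × Option String × Int
  | [], st => st
  | n :: rest, (head, last, count) =>
    let head' := match last with | none => head | some x => head ++ ", " ++ x
    pvChain rest (head', some n, count + 1)

theorem loopB_eq_chain (ac : List String) (sa : List (String × Bool))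
    (st : String × Option String × Int) :
    pvLoopB ac sa st = pvChain (pvSelectedNames sa ac) st := by
  induction sa generalizing st with
  | nil => rfl
  | cons p rest ih =>
    obtain ⟨name, selected⟩ := p
    obtain ⟨h, l, c⟩ := st
    simp only [pvLoopB, pvSelectedNames, List.filter_cons, ih]
    by_cases hs : selected = true
    · by_cases hm : name ∈ ac
      · simp [hs, hm, pvChain]
      · simp [hs, hm]
    · simp [hs]

theorem chain_spec (names : List String) (h x : String) (c : Int) :
    pvChain names (h, some x, c) =
      (List.foldl (fun a n => a ++ ", " ++ n) h ((x :: names).dropLast),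
       (x :: names).getLast?, c + names.length) := by
  induction names generalizing h x c with
  | nil => simp [pvChain]
  | cons n rest ih =>
    show pvChain rest (h ++ ", " ++ x, some n, c + 1) = _
    rw [ih]
    refine Prod.ext ?_ (Prod.ext ?_ ?_)
    · simp [List.dropLast]
    · simp
    · simp; omega

theorem join_comma_cons (x : String) (y : String) (l : List String) :
    PySem.Str.join ", " (x :: y :: l) = x ++ ", " ++ PySem.Str.join ", " (y :: l) := by
  apply String.ext
  simp [PySem.Str.toList_join, PySem.Chars.join_cons_cons]

theorem foldl_comma_join (l : List String) (a h : String) :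
    List.foldl (fun acc n => acc ++ ", " ++ n) h (a :: l)
      = h ++ ", " ++ PySem.Str.join ", " (a :: l) := by
  induction l generalizing a h with
  | nil =>
    apply String.ext
    simp [PySem.Str.toList_join]
  | cons b rest ih =>
    show List.foldl _ (h ++ ", " ++ a) (b :: rest) = _
    rw [ih, join_comma_cons]
    apply String.ext
    simp

theorem label_eq (names : List String) :
    (if names.isEmpty then "Coverage from Income"
     else if names.length == 1 then
       "Coverage from Income and " ++ ((PySem.List.pyGet? names 0).getD "")
     else
       "Coverage from Income, " ++ PySem.Str.join ", " (PySem.List.slice names none (some (-1))) ++ ", and " ++ ((PySem.List.pyGet? names (-1)).getD ""))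
    =
    (match pvChain names ("Coverage from Income", none, 0) with
     | (head, none, _) => head
     | (head, some last, count) =>
       if count == 1 then head ++ " and " ++ last
       else head ++ ", and " ++ last) := by
  match names with
  | [] => rfl
  | [x] =>
    show _ = (if (0 : Int) + 1 == 1 then _ else _)
    simp [PySem.List.pyGet?, PySem.List.pyIdx?]
  | x :: y :: rest =>
    have h2 : ¬ ((x :: y :: rest).length == 1) = true := by simp
    simp only [List.isEmpty_cons, Bool.false_eq_true, if_false, h2]
    show _ = (match pvChain (y :: rest) ("Coverage from Income", some x, 0 + 1) with
      | (head, none, _) => head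
      | (head, some last, count) =>
        if count == 1 then head ++ " and " ++ last else head ++ ", and " ++ last)
    rw [chain_spec]
    have hcnt : ¬ ((0 : Int) + 1 + ((y : String) :: rest).length == 1) = true := by
      simp; omega
    have hgl : (x :: y :: rest).getLast? = some ((x :: y :: rest).getLast (by simp)) := by
      simp [List.getLast?_eq_some_getLast]
    rw [hgl]
    simp only [hcnt]
    rw [PySem.List.slice_to_neg_one, PySem.List.pyGet?_neg_one, hgl]
    have hdl : (x :: y :: rest).dropLast = x :: (y :: rest).dropLast := by
      simp [List.dropLast]
    rw [hdl, foldl_comma_join]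
    rcases List.eq_nil_or_concat ((y : String) :: rest).dropLast with hx | ⟨pre, z, hz⟩
    · -- rest = [], dropLast (y::rest) = []
      apply String.ext
      simp [hx, PySem.Str.toList_join]
    · apply String.ext
      simp [PySem.Str.toList_join]

-- ===== VERDICT (by name: the statement is the Claim_ definition above) =====
theorem get_dynamic_coverage_label_py_spec : Claim_equal_get_dynamic_coverage_label_py := by
  intro sa ac _
  unfold Spec_get_dynamic_coverage_label_py get_dynamic_coverage_label_py get_dynamic_coverage_label_py_alt
  rw [loopB_eq_chain]
  exact label_eq (pvSelectedNames sa ac)
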